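-- pv_equiv track=rewrite | github.com/afvial/onate | scripts/onate_tei.py | _group_spans_into_sentences
-- ===== SOURCE A (Python) =====
-- def _group_spans_into_sentences(spans: list) -> list:
--     """
--     Agrupa spans en oraciones según is_sent_end.
--     Devuelve lista de listas de raw_6tuples (una lista de spans por oración).
--     """
--     sentences, current = [], []
--     for raw, is_sent_end in spans:
--         current.append(raw)
--         if is_sent_end:
--             sentences.append(current)
--             current = []
--     if current:
--         sentences.append(current)
--     return sentences
-- ===== SOURCE B (Python) =====
-- def _group_spans_into_sentences(spans: list) -> list:
--     """Compute sentence-boundary indices first, then slice the raw list at them."""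
--     raws = [raw for raw, _ in spans]
--     ends = [i for i, (_, e) in enumerate(spans) if e]
--     result = []
--     start = 0
--     for i in ends:
--         result.append(raws[start:i + 1])
--         start = i + 1
--     if start < len(raws):
--         result.append(raws[start:])
--     return result
-- ===== Notes on version B (the rewrite author's own statement) =====
-- stated objective: alternative
-- what changed: Replaces the accumulate-and-flush pass over (raw, flag) pairs with a two-phase decomposition: first collect the raw values and the boundary indices where is_sent_end is true, then cut the raw list into slices at those boundaries (plus the trailing slice if any).
import Mathlib
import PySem

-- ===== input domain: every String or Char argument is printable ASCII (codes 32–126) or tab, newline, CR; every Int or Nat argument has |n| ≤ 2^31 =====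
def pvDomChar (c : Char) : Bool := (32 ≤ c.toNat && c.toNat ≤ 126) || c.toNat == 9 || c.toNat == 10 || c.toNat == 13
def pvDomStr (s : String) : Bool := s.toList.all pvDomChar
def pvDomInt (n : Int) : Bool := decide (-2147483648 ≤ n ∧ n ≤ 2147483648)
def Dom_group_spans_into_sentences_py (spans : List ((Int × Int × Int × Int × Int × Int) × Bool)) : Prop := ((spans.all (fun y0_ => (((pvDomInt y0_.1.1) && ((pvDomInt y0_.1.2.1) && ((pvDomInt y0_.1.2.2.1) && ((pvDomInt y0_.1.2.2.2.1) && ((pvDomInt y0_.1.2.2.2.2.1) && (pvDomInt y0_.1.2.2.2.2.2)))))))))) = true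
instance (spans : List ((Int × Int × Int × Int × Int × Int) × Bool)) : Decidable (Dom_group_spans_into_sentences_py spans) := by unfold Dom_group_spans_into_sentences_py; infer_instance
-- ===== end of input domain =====

-- B groups by first collecting the raws and the boundary indices, then slicing — an alternative decomposition of A's single accumulate-and-flush pass; equal results proved.

-- ===== PORT A =====
-- loop body of A: current.append(raw); if is_sent_end: flush current
def pvStepA (st : List (List (Int × Int × Int × Int × Int × Int)) × List (Int × Int × Int × Int × Int × Int))
    (p : (Int × Int × Int × Int × Int × Int) × Bool) :
    List (List (Int × Int × Int × Int × Int × Int)) × List (Int × Int × Int × Int × Int × Int) :=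
  let current := st.2 ++ [p.1]
  if p.2 then (st.1 ++ [current], []) else (st.1, current)

def group_spans_into_sentences_py (spans : List ((Int × Int × Int × Int × Int × Int) × Bool)) : List (List (Int × Int × Int × Int × Int × Int)) :=
  let st := spans.foldl pvStepA ([], [])
  if st.2 = [] then st.1 else st.1 ++ [st.2]

-- ===== PORT B =====
-- loop body of B: result.append(raws[start:i+1]); start = i+1
def pvStepB (raws : List (Int × Int × Int × Int × Int × Int))
    (st : List (List (Int × Int × Int × Int × Int × Int)) × Int) (i : Int) :
    List (List (Int × Int × Int × Int × Int × Int)) × Int :=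
  (st.1 ++ [PySem.List.slice raws (some st.2) (some (i + 1))], i + 1)

-- ends = [i for i, (_, e) in enumerate(spans) if e]
def pvEnds (spans : List ((Int × Int × Int × Int × Int × Int) × Bool)) : List Int :=
  (PySem.List.enumerate spans 0).filterMap (fun q => if q.2.2 then some q.1 else none)

def group_spans_into_sentences_py_alt (spans : List ((Int × Int × Int × Int × Int × Int) × Bool)) : List (List (Int × Int × Int × Int × Int × Int)) :=
  let raws := spans.map Prod.fst
  let st := (pvEnds spans).foldl (pvStepB raws) ([], 0)
  if st.2 < (raws.length : Int) then st.1 ++ [PySem.List.slice raws (some st.2) none] else st.1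

-- ===== PRECONDITION & SPEC =====
def Spec_group_spans_into_sentences_py (spans : List ((Int × Int × Int × Int × Int × Int) × Bool)) (out : List (List (Int × Int × Int × Int × Int × Int))) : Prop := out = group_spans_into_sentences_py_alt spans
-- instance search times out on the deeply nested product, so the DecidableEq is spelled out
def pvDecEqLL : DecidableEq (List (List (Int × Int × Int × Int × Int × Int))) :=
  @List.hasDecEq _ (@List.hasDecEq _ inferInstance)
instance (spans : List ((Int × Int × Int × Int × Int × Int) × Bool)) (out : List (List (Int × Int × Int × Int × Int × Int))) : Decidable (Spec_group_spans_into_sentences_py spans out) := by unfold Spec_group_spans_into_sentences_py; exact pvDecEqLL out _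

-- ===== CLAIM (what is proved, stated in full; the proofs are below) =====
def Claim_equal_group_spans_into_sentences_py : Prop := ∀ (spans : List ((Int × Int × Int × Int × Int × Int) × Bool)), Dom_group_spans_into_sentences_py spans → Spec_group_spans_into_sentences_py spans (group_spans_into_sentences_py spans)

-- ===== LEMMAS AND PROOFS =====

-- slicing a prefix: bounds within xs ignore the appended tail
theorem pv_slice_append {α : Type} (xs ys : List α) (a b : Int) (ha : 0 ≤ a) (hb : 0 ≤ b)
    (hble : b ≤ (xs.length : Int)) :
    PySem.List.slice (xs ++ ys) (some a) (some b) = PySem.List.slice xs (some a) (some b) := by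
  rw [PySem.List.slice_toNat _ ha hb, PySem.List.slice_toNat _ ha hb]
  rcases le_or_gt a b with h | h
  · have hbn : b.toNat ≤ xs.length := by omega
    have han : a.toNat ≤ xs.length := by omega
    rw [List.drop_append_of_le_length han, List.take_append_of_le_length (by
      simp [List.length_drop]; omega)]
  · have : b.toNat - a.toNat = 0 := by omega
    simp [this]

-- fold over in-range boundary indices ignores an appended tail of raws
theorem pv_foldB_ext (raws ext : List (Int × Int × Int × Int × Int × Int)) :
    ∀ (ends : List Int) (res : List (List (Int × Int × Int × Int × Int × Int))) (start : Int),
    0 ≤ start → (∀ i ∈ ends, 0 ≤ i ∧ i + 1 ≤ (raws.length : Int)) →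
    ends.foldl (pvStepB (raws ++ ext)) (res, start) = ends.foldl (pvStepB raws) (res, start) := by
  intro ends
  induction ends with
  | nil => intro _ _ _ _; rfl
  | cons i rest ih =>
    intro res start hs hmem
    obtain ⟨hi0, hi1⟩ := hmem i (by simp)
    simp only [List.foldl_cons]
    rw [show pvStepB (raws ++ ext) (res, start) i = pvStepB raws (res, start) i by
      simp [pvStepB, pv_slice_append raws ext start (i + 1) hs (by omega) hi1]]
    exact ih _ _ (by omega) (fun j hj => hmem j (by simp [hj]))

theorem pv_ends_mem (spans : List ((Int × Int × Int × Int × Int × Int) × Bool)) :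
    ∀ i ∈ pvEnds spans, 0 ≤ i ∧ i + 1 ≤ (spans.length : Int) := by
  intro i hi
  simp only [pvEnds, List.mem_filterMap] at hi
  obtain ⟨q, hq, hif⟩ := hi
  rw [PySem.List.mem_enumerate_iff] at hq
  obtain ⟨k, hk, rfl⟩ := hq
  by_cases h : (spans[k].2 : Bool) <;> simp [h] at hif
  omega

theorem pv_ends_append (spans : List ((Int × Int × Int × Int × Int × Int) × Bool))
    (x : (Int × Int × Int × Int × Int × Int) × Bool) :
    pvEnds (spans ++ [x]) = pvEnds spans ++ (if x.2 then [(spans.length : Int)] else []) := by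
  simp [pvEnds, PySem.List.enumerate_append, List.filterMap_append, PySem.List.enumerate]
  by_cases h : x.2 <;> simp [h]

-- the invariant tying A's fold state to B's fold state
theorem pv_invariant (spans : List ((Int × Int × Int × Int × Int × Int) × Bool)) :
    ∃ k : Nat, k ≤ spans.length ∧
      (pvEnds spans).foldl (pvStepB (spans.map Prod.fst)) ([], 0)
        = ((spans.foldl pvStepA ([], [])).1, (k : Int)) ∧
      (spans.foldl pvStepA ([], [])).2 = (spans.map Prod.fst).drop k := by
  induction spans using List.reverseRecOn with
  | nil => exact ⟨0, by simp [pvEnds, PySem.List.enumerate]⟩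
  | append_singleton spans x ih =>
    obtain ⟨k, hk, hB, hA⟩ := ih
    obtain ⟨r, e⟩ := x
    have hmap : (spans ++ [(r, e)]).map Prod.fst = spans.map Prod.fst ++ [r] := by simp
    have hlen : (spans.map Prod.fst).length = spans.length := by simp
    have hfoldA : (spans ++ [(r, e)]).foldl pvStepA ([], []) =
        pvStepA (spans.foldl pvStepA ([], [])) (r, e) := by
      rw [List.foldl_append]; rfl
    have hextB : (pvEnds spans).foldl (pvStepB (spans.map Prod.fst ++ [r])) ([], 0)
        = ((spans.foldl pvStepA ([], [])).1, (k : Int)) := by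
      rw [pv_foldB_ext _ _ _ _ _ le_rfl (by
        intro i hi; have := pv_ends_mem spans i hi; omega), hB]
    rw [pv_ends_append]
    by_cases he : e
    · -- sentence end: A flushes; B gets one more boundary index
      refine ⟨spans.length + 1, by simp, ?_, ?_⟩
      · rw [hmap, List.foldl_append, if_pos he, List.foldl_cons, List.foldl_nil, hextB, hfoldA]
        simp only [pvStepB, pvStepA, if_pos he, Prod.mk.injEq]
        refine ⟨?_, by push_cast; ring⟩
        congr 1
        rw [show ((spans.length : Int) + 1) = (((spans.length + 1 : Nat)) : Int) by push_cast; ring,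
          PySem.List.slice_natCast, hA,
          List.drop_append_of_le_length (by omega),
          List.take_of_length_le (by simp; omega)]
      · rw [hfoldA]
        simp only [pvStepA, if_pos he]
        simp [hmap]
    · -- not a sentence end: B's state unchanged; A extends current
      refine ⟨k, by simp; omega, ?_, ?_⟩
      · rw [hmap, if_neg he]
        simp only [List.append_nil]
        rw [hextB, hfoldA]
        simp [pvStepA, he]
      · rw [hfoldA]
        simp only [pvStepA, if_neg he]
        simp only [hmap]
        rw [List.drop_append_of_le_length (by omega), hA]

-- ===== VERDICT (by name: the statement is the Claim_ definition above) =====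
theorem group_spans_into_sentences_py_spec : Claim_equal_group_spans_into_sentences_py := by
  intro spans _
  unfold Spec_group_spans_into_sentences_py group_spans_into_sentences_py group_spans_into_sentences_py_alt
  obtain ⟨k, hk, hB, hA⟩ := pv_invariant spans
  simp only [hB, hA]
  have hlen : (spans.map Prod.fst).length = spans.length := by simp
  rw [PySem.List.slice_from _ (by positivity), Int.toNat_natCast]
  by_cases h : (spans.map Prod.fst).drop k = []
  · rw [if_pos h]
    have : spans.length ≤ k := by
      rw [List.drop_eq_nil_iff] at h; omega
    rw [if_neg (by omega)]
  · rw [if_neg h]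
    have : k < spans.length := by
      by_contra hc
      exact h (List.drop_eq_nil_iff.mpr (by omega))
    rw [if_pos (by omega)]
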